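-- pv_equiv track=rewrite | github.com/ccusrz/hakuna-matata | HS08PAUL.py | operation
-- ===== SOURCE A (Python) =====
-- def operation(n):
--
--     count = 0
--     for i in range(n):
--         if pow(i,2) <= n:
--             for j in range(n):
--                 if pow(j,4) <= n:
--                     operation = pow(i,2) + pow(j,4)
--                     if operation > 1 and operation <= n:
--                         for z in range(2, operation):
--                             if (operation % z) == 0:
--                                 break
--                         else:
--                             count += 1
--                 else:
--                     continue
--         else:
--             continue
--     return count
-- ===== SOURCE B (Python) =====
-- def _is_prime(m):
--     z = 2
--     while z * z <= m:
--         if m % z == 0: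
--             return False
--         z += 1
--     return True
--
-- def operation(n):
--     count = 0
--     i = 0
--     while i * i <= n:
--         j = 0
--         while j * j * j * j <= n:
--             m = i * i + j * j * j * j
--             if 1 < m <= n and _is_prime(m):
--                 count += 1
--             j += 1
--         i += 1
--     return count
-- ===== Notes on version B (the rewrite author's own statement) =====
-- stated objective: faster
-- what changed: Replaced the full range(n) scans for i and j (filtered by i^2<=n, j^4<=n) with while-loops that stop at the first i with i^2>n / j with j^4>n, and replaced the O(m) trial division over range(2,m) with trial division bounded by z*z<=m in a helper predicate.
import Mathlib
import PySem

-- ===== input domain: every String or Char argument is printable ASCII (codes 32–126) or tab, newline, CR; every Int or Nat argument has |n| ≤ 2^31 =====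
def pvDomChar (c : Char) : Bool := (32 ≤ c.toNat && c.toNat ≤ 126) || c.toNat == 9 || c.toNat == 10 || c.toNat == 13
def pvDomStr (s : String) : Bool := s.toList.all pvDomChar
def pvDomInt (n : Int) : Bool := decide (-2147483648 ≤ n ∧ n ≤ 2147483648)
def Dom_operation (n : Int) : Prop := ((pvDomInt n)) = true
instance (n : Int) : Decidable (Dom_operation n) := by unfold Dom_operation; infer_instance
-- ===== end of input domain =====

-- B replaces A's full range(n) scans (filtered by i^2<=n / j^4<=n) with while-loops that
-- stop at the first out-of-bound i / j, and bounds the trial division by z*z<=m.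

-- ===== PORT A =====
-- literal port of A: for i in range(n) / for j in range(n) with the filters, and the
-- for-else trial division over range(2, op) ported as an `.all` over that range
def operation (n : Int) : Int :=
  (PySem.List.pyRange 0 n 1).foldl (fun count i =>
    if i ^ 2 ≤ n then
      (PySem.List.pyRange 0 n 1).foldl (fun count j =>
        if j ^ 4 ≤ n then
          let op := i ^ 2 + j ^ 4
          if op > 1 ∧ op ≤ n then
            if (PySem.List.pyRange 2 op 1).all (fun z => !(PySem.Int.mod op z == 0))
            then count + 1 else count
          else count
        else count) count
    else count) 0

-- ===== PORT B =====
-- `while z * z <= m: if m % z == 0: return False; z += 1; return True` of _is_prime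
def pvTrial (m z : Int) : Bool :=
  if h : z * z ≤ m then
    if PySem.Int.mod m z == 0 then false else pvTrial m (z + 1)
  else true
termination_by (m + 1 - z).toNat
decreasing_by
  have hz : z ≤ m := by nlinarith
  omega

def pvIsPrime (m : Int) : Bool := pvTrial m 2

-- inner `while j*j*j*j <= n` loop of B
def pvLoopJ (n i : Int) (j : Int) (count : Int) : Int :=
  if h : j * j * j * j ≤ n then
    let m := i * i + j * j * j * j
    pvLoopJ n i (j + 1) (if 1 < m ∧ m ≤ n ∧ pvIsPrime m then count + 1 else count)
  else count
termination_by (n + 1 - j).toNat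
decreasing_by
  have hj : j ≤ n := by nlinarith [sq_nonneg j, sq_nonneg (j-1), sq_nonneg (j*j-1), sq_nonneg (j*j-j)]
  omega

-- outer `while i*i <= n` loop of B
def pvLoopI (n : Int) (i : Int) (count : Int) : Int :=
  if h : i * i ≤ n then
    pvLoopI n (i + 1) (pvLoopJ n i 0 count)
  else count
termination_by (n + 1 - i).toNat
decreasing_by
  have hi : i ≤ n := by nlinarith
  omega

def operation_alt (n : Int) : Int := pvLoopI n 0 0

-- ===== PRECONDITION & SPEC =====
def Spec_operation (n : Int) (out : Int) : Prop := out = operation_alt n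
instance (n : Int) (out : Int) : Decidable (Spec_operation n out) := by unfold Spec_operation; infer_instance

-- ===== CLAIM (what is proved, stated in full; the proofs are below) =====
def Claim_equal_operation : Prop := ∀ (n : Int), Dom_operation n → Spec_operation n (operation n)

-- ===== LEMMAS AND PROOFS =====

-- the 0/1 summand of B's inner loop
def pvTermB (n i j : Int) : Int :=
  if j * j * j * j ≤ n then
    (if 1 < i * i + j * j * j * j ∧ i * i + j * j * j * j ≤ n ∧ pvIsPrime (i * i + j * j * j * j)
     then 1 else 0)
  else 0

-- the summand of B's outer loop
def pvTermBI (n i : Int) : Int :=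
  if i * i ≤ n then ((PySem.List.pyRange 0 (n + 1) 1).map (pvTermB n i)).sum else 0

-- the 0/1 summand of A's inner loop
def pvTermA (n i j : Int) : Int :=
  if j ^ 4 ≤ n then
    (if i ^ 2 + j ^ 4 > 1 ∧ i ^ 2 + j ^ 4 ≤ n then
      (if (PySem.List.pyRange 2 (i ^ 2 + j ^ 4) 1).all
            (fun z => !(PySem.Int.mod (i ^ 2 + j ^ 4) z == 0)) then 1 else 0)
     else 0)
  else 0

-- the summand of A's outer loop
def pvTermAI (n i : Int) : Int :=
  if i ^ 2 ≤ n then ((PySem.List.pyRange 0 n 1).map (pvTermA n i)).sum else 0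

-- trial division bounded by z*z ≤ m decides "no divisor w ≥ z with w*w ≤ m"
theorem pvTrial_eq_true_iff (m : Int) : ∀ z : Int, 0 < z →
    (pvTrial m z = true ↔ ∀ w : Int, z ≤ w → w * w ≤ m → ¬ w ∣ m) := by
  have key : ∀ k : Nat, ∀ z : Int, (m + 1 - z).toNat = k → 0 < z →
      (pvTrial m z = true ↔ ∀ w : Int, z ≤ w → w * w ≤ m → ¬ w ∣ m) := by
    intro k
    induction k using Nat.strong_induction_on with
    | _ k ih =>
      intro z hk hz
      rw [pvTrial]
      by_cases h : z * z ≤ m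
      · rw [dif_pos h]
        have hzm : z ≤ m := by nlinarith
        by_cases hd : z ∣ m
        · have : PySem.Int.mod m z = 0 := (PySem.Int.mod_eq_zero_iff_dvd m z).mpr hd
          simp only [this]
          simp only [beq_self_eq_true, if_pos]
          constructor
          · intro hfalse; exact absurd hfalse (by simp)
          · intro hall; exact absurd (hall z le_rfl h) (by simp [hd])
        · have hmod : ¬ (PySem.Int.mod m z = 0) := fun hc => hd ((PySem.Int.mod_eq_zero_iff_dvd m z).mp hc)
          rw [if_neg (by simpa using hmod)]
          rw [ih (m + 1 - (z + 1)).toNat (by omega) (z + 1) rfl (by omega)]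
          constructor
          · intro htail w hw hwm
            rcases eq_or_lt_of_le hw with rfl | hlt
            · exact hd
            · exact htail w (by omega) hwm
          · intro hall w hw hwm
            exact hall w (by omega) hwm
      · rw [dif_neg h]
        constructor
        · intro _ w hw hwm
          exfalso
          have : z * z ≤ w * w := by nlinarith
          exact h (le_trans this hwm)
        · intro _; rfl
  intro z hz
  exact key (m + 1 - z).toNat z rfl hz

-- A's full trial division over range(2, m) agrees with B's bounded one for 1 < m
theorem pvAll_eq_isPrime (m : Int) (hm : 1 < m) :
    ((PySem.List.pyRange 2 m 1).all (fun z => !(PySem.Int.mod m z == 0))) = pvIsPrime m := by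
  have hA : ((PySem.List.pyRange 2 m 1).all (fun z => !(PySem.Int.mod m z == 0))) = true ↔
      ∀ z : Int, 2 ≤ z → z < m → ¬ z ∣ m := by
    rw [List.all_eq_true]
    constructor
    · intro hall z h2 hlt hdvd
      have hz : z ∈ PySem.List.pyRange 2 m 1 := (PySem.List.mem_pyRange_one).mpr ⟨h2, hlt⟩
      have := hall z hz
      rw [(PySem.Int.mod_eq_zero_iff_dvd m z).mpr hdvd] at this
      simp at this
    · intro hall z hz
      obtain ⟨h2, hlt⟩ := (PySem.List.mem_pyRange_one).mp hz
      have : ¬ (PySem.Int.mod m z = 0) := fun hc =>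
        hall z h2 hlt ((PySem.Int.mod_eq_zero_iff_dvd m z).mp hc)
      simpa using this
  have hB : pvIsPrime m = true ↔ ∀ w : Int, 2 ≤ w → w * w ≤ m → ¬ w ∣ m := by
    unfold pvIsPrime
    exact pvTrial_eq_true_iff m 2 (by norm_num)
  have hiff : (∀ z : Int, 2 ≤ z → z < m → ¬ z ∣ m) ↔
      (∀ w : Int, 2 ≤ w → w * w ≤ m → ¬ w ∣ m) := by
    constructor
    · intro h w h2 hwm
      exact h w h2 (by nlinarith)
    · intro h z h2 hlt hdvd
      obtain ⟨d, hd⟩ := hdvd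
      have hz0 : 0 < z := by omega
      have hm0 : 0 < m := by omega
      have hd0 : 0 < d := by nlinarith
      have hd2 : 2 ≤ d := by
        rcases (by omega : d = 1 ∨ 2 ≤ d) with rfl | h2d
        · omega
        · exact h2d
      by_cases hzz : z * z ≤ m
      · exact h z h2 hzz ⟨d, hd⟩
      · have hdz : d < z := by nlinarith
        have hdd : d * d ≤ m := by nlinarith
        exact h d hd2 hdd ⟨z, by rw [hd]; ring⟩
  rw [Bool.eq_iff_iff, hA, hB, hiff]

-- j ↦ j*j*j*j is monotone on 0 ≤ j
theorem pvPow4_mono {j k : Int} (hj : 0 ≤ j) (hjk : j ≤ k) : j * j * j * j ≤ k * k * k * k := by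
  nlinarith [mul_le_mul hjk hjk hj (by omega : (0:Int) ≤ k),
             mul_le_mul (mul_le_mul hjk hjk hj (by omega : (0:Int) ≤ k))
               (mul_le_mul hjk hjk hj (by omega : (0:Int) ≤ k))
               (by nlinarith : (0:Int) ≤ j * j) (by nlinarith : (0:Int) ≤ k * k)]

theorem pvLoopJ_eq (n i : Int) : ∀ j c : Int, 0 ≤ j →
    pvLoopJ n i j c = c + ((PySem.List.pyRange j (n + 1) 1).map (pvTermB n i)).sum := by
  have key : ∀ k : Nat, ∀ j c : Int, (n + 1 - j).toNat = k → 0 ≤ j →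
      pvLoopJ n i j c = c + ((PySem.List.pyRange j (n + 1) 1).map (pvTermB n i)).sum := by
    intro k
    induction k using Nat.strong_induction_on with
    | _ k ih =>
      intro j c hk hj
      rw [pvLoopJ]
      by_cases h : j * j * j * j ≤ n
      · rw [dif_pos h]
        have hjn : j ≤ n := by nlinarith [sq_nonneg j, sq_nonneg (j-1), sq_nonneg (j*j-1), sq_nonneg (j*j-j)]
        rw [PySem.List.pyRange_one_cons (by omega : j < n + 1)]
        rw [List.map_cons, List.sum_cons]
        rw [ih (n + 1 - (j + 1)).toNat (by omega) (j + 1) _ rfl (by omega)]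
        have hterm : pvTermB n i j = if 1 < i * i + j * j * j * j ∧ i * i + j * j * j * j ≤ n ∧
            pvIsPrime (i * i + j * j * j * j) then 1 else 0 := by
          unfold pvTermB; rw [if_pos h]
        rw [hterm]
        split_ifs <;> ring
      · rw [dif_neg h]
        have hzero : ((PySem.List.pyRange j (n + 1) 1).map (pvTermB n i)).sum = 0 := by
          apply List.sum_eq_zero
          intro x hx
          obtain ⟨w, hw, rfl⟩ := List.mem_map.mp hx
          obtain ⟨hjw, _⟩ := (PySem.List.mem_pyRange_one).mp hw
          unfold pvTermB
          rw [if_neg]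
          push Not at h ⊢
          exact lt_of_lt_of_le h (pvPow4_mono hj hjw)
        rw [hzero]; ring
  intro j c hj
  exact key (n + 1 - j).toNat j c rfl hj

theorem pvLoopI_eq (n : Int) : ∀ i c : Int, 0 ≤ i →
    pvLoopI n i c = c + ((PySem.List.pyRange i (n + 1) 1).map (pvTermBI n)).sum := by
  have key : ∀ k : Nat, ∀ i c : Int, (n + 1 - i).toNat = k → 0 ≤ i →
      pvLoopI n i c = c + ((PySem.List.pyRange i (n + 1) 1).map (pvTermBI n)).sum := by
    intro k
    induction k using Nat.strong_induction_on with
    | _ k ih =>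
      intro i c hk hi
      rw [pvLoopI]
      by_cases h : i * i ≤ n
      · rw [dif_pos h]
        have hin : i ≤ n := by nlinarith
        rw [PySem.List.pyRange_one_cons (by omega : i < n + 1)]
        rw [List.map_cons, List.sum_cons]
        rw [ih (n + 1 - (i + 1)).toNat (by omega) (i + 1) _ rfl (by omega)]
        rw [pvLoopJ_eq n i 0 c (by norm_num)]
        have hterm : pvTermBI n i = ((PySem.List.pyRange 0 (n + 1) 1).map (pvTermB n i)).sum := by
          unfold pvTermBI; rw [if_pos h]
        rw [hterm]; ring
      · rw [dif_neg h]
        have hzero : ((PySem.List.pyRange i (n + 1) 1).map (pvTermBI n)).sum = 0 := by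
          apply List.sum_eq_zero
          intro x hx
          obtain ⟨w, hw, rfl⟩ := List.mem_map.mp hx
          obtain ⟨hiw, _⟩ := (PySem.List.mem_pyRange_one).mp hw
          unfold pvTermBI
          rw [if_neg]
          push Not at h ⊢
          nlinarith
        rw [hzero]; ring
  intro i c hi
  exact key (n + 1 - i).toNat i c rfl hi

-- a foldl whose body adds g x is the sum of g over the list
theorem pvFoldSum (l : List Int) (f : Int → Int → Int) (g : Int → Int)
    (h : ∀ acc x, x ∈ l → f acc x = acc + g x) : ∀ c : Int, l.foldl f c = c + (l.map g).sum := by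
  induction l with
  | nil => intro c; simp
  | cons a t ih =>
    intro c
    simp only [List.foldl_cons, List.map_cons, List.sum_cons]
    rw [h c a (by simp)]
    rw [ih (fun acc x hx => h acc x (by simp [hx])) (c + g a)]
    ring

-- A's nested foldl as a sum of pvTermAI
theorem pvOpA_eq_sum (n : Int) :
    operation n = ((PySem.List.pyRange 0 n 1).map (pvTermAI n)).sum := by
  unfold operation
  rw [pvFoldSum _ _ (pvTermAI n) ?houter 0]
  · ring
  case houter =>
    intro count i _
    unfold pvTermAI
    split_ifs with hcase
    · rw [pvFoldSum _ _ (pvTermA n i) ?hinner count]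
      case hinner =>
        intro acc x _
        unfold pvTermA
        dsimp only
        split_ifs <;> ring
    · ring

-- for 0 ≤ i, 0 ≤ j inside the ranges the two summands agree
theorem pvTermA_eq_termB (n i j : Int) : pvTermA n i j = pvTermB n i j := by
  unfold pvTermA pvTermB
  have hij2 : i ^ 2 + j ^ 4 = i * i + j * j * j * j := by ring
  have hj4 : j ^ 4 = j * j * j * j := by ring
  rw [hij2, hj4]
  by_cases h1 : j * j * j * j ≤ n
  · rw [if_pos h1, if_pos h1]
    by_cases hm : 1 < i * i + j * j * j * j ∧ i * i + j * j * j * j ≤ n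
    · rw [if_pos hm]
      rw [pvAll_eq_isPrime _ hm.1]
      by_cases hp : pvIsPrime (i * i + j * j * j * j) = true
      · rw [if_pos hp, if_pos ⟨hm.1, hm.2, hp⟩]
      · rw [if_neg hp, if_neg (by tauto)]
    · rw [if_neg hm, if_neg (by tauto)]
  · rw [if_neg h1, if_neg h1]

-- the extra index n of B's inner range contributes 0
theorem pvTermB_top (n i : Int) (hn : 0 ≤ n) : pvTermB n i n = 0 := by
  unfold pvTermB
  rcases (by omega : n ≤ 1 ∨ 2 ≤ n) with h1 | h2
  · split_ifs with ha hb
    · exfalso; omega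
    · rfl
    · rfl
  · rw [if_neg]
    push Not
    nlinarith [sq_nonneg n, sq_nonneg (n - 1), sq_nonneg (n * n - 1), sq_nonneg (n * n - n)]

-- the extra index n of B's outer range contributes 0
theorem pvTermBI_top (n : Int) (hn : 0 ≤ n) : pvTermBI n n = 0 := by
  unfold pvTermBI
  rcases (by omega : n ≤ 1 ∨ 2 ≤ n) with h1 | h2
  · rw [if_pos (by nlinarith)]
    apply List.sum_eq_zero
    intro x hx
    obtain ⟨w, hw, rfl⟩ := List.mem_map.mp hx
    unfold pvTermB
    split_ifs with ha hb
    · exfalso; omega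
    · rfl
    · rfl
  · rw [if_neg]; push Not; nlinarith

theorem pvTermAI_eq_termBI (n i : Int) (hn : 0 ≤ n) :
    pvTermAI n i = pvTermBI n i := by
  unfold pvTermAI pvTermBI
  have hi2 : i ^ 2 = i * i := by ring
  rw [hi2]
  split_ifs with h
  · rw [PySem.List.pyRange_one_succ_right (by omega : (0:Int) ≤ n), List.map_append,
      List.sum_append]
    simp only [List.map_cons, List.map_nil, List.sum_cons, List.sum_nil]
    rw [pvTermB_top n i hn]
    rw [List.map_congr_left (fun j _ => pvTermA_eq_termB n i j)]
    ring
  · rfl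

-- ===== VERDICT (by name: the statement is the Claim_ definition above) =====
theorem operation_spec : Claim_equal_operation := by
  intro n _
  unfold Spec_operation operation_alt
  rw [pvLoopI_eq n 0 0 le_rfl, pvOpA_eq_sum]
  rcases (by omega : n < 0 ∨ 0 ≤ n) with hneg | hn
  · rw [PySem.List.pyRange_one_eq_nil (by omega : n ≤ 0),
      PySem.List.pyRange_one_eq_nil (by omega : n + 1 ≤ 0)]
    simp
  · rw [PySem.List.pyRange_one_succ_right (by omega : (0:Int) ≤ n), List.map_append,
      List.sum_append]
    simp only [List.map_cons, List.map_nil, List.sum_cons, List.sum_nil]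
    rw [pvTermBI_top n hn]
    rw [List.map_congr_left (fun i _ => pvTermAI_eq_termBI n i hn)]
    ring
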